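-- pv_equiv track=rewrite | github.com/phil-huynh/Problem-Sets | python/other_py_problems/word_spiral_peremutaion.py | spiral_permutations
-- ===== SOURCE A (Python) =====
-- def spiral_permutations(s):
--     result, current, complete, checker = [s], s, False, {s:True}
--     while not complete:
--         string, i, j = "", 0, len(current) - 1
--         while i <= j:
--             string += current[i] if i == j else f"{current[j]}{current[i]}"
--             i += 1
--             j -= 1
--         if string not in checker:
--             checker[string] = True
--             result.append(string)
--             current = string
--         else:
--             complete = True
--     return result
-- ===== SOURCE B (Python) =====
-- def spiral_permutations(s):
--     # Walk the orbit of the spiral step BACKWARDS: apply the inverse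
--     # ("un-spiral") step, which scatters characters back into a buffer,
--     # until we return to s, then reverse the collected tail.  The spiral
--     # step is a bijection on length-n strings, so its orbit through s is a
--     # cycle: the backward walk visits exactly the forward orbit in reverse.
--     n = len(s)
--
--     def unspiral(x):
--         # inverse step: x[2t] came from position n-1-t, x[2t+1] from position t
--         buf = [''] * n
--         for t in range((n + 1) // 2):
--             buf[n - 1 - t] = x[2 * t]
--             if 2 * t + 1 < n:
--                 buf[t] = x[2 * t + 1]
--         return ''.join(buf)
--
--     tail = []
--     x = unspiral(s)
--     while x != s:
--         tail.append(x)
--         x = unspiral(x)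
--     tail.reverse()
--     return [s] + tail
-- ===== Notes on version B (the rewrite author's own statement) =====
-- stated objective: alternative
-- what changed: B drops A's forward spiral step and seen-dict entirely: it walks the orbit in the opposite direction with the inverse (un-spiral) scatter step, stops when it returns to the start string (the step is a bijection, so the orbit is a cycle), and builds the result back-to-front by reversing the collected tail.
import Mathlib
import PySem

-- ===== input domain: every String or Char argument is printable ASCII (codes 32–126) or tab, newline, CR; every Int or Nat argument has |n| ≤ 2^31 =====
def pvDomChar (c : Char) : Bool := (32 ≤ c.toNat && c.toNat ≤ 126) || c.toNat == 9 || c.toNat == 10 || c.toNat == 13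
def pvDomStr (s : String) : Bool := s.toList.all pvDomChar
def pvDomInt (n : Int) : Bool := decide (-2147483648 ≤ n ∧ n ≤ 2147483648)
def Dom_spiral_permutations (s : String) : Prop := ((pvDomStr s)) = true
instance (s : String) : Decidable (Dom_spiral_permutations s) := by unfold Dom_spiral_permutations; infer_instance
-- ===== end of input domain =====

-- B drops A's forward spiral step and seen-dict: it walks the orbit backwards with the
-- inverse (un-spiral) scatter step until it returns to s, and reverses the collected tail.

-- ===== PORT A =====
-- inner while loop: string += current[i] if i == j else current[j]+current[i]; i += 1; j -= 1
-- (pyGetD: inside this loop 0 ≤ i ≤ j < len(current), so indexing never raises)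
def spInner (cur : List Char) (acc : List Char) (i j : Int) : List Char :=
  if i ≤ j then
    spInner cur
      (acc ++ (if i = j then [PySem.List.pyGetD cur i ' ']
               else [PySem.List.pyGetD cur j ' ', PySem.List.pyGetD cur i ' ']))
      (i + 1) (j - 1)
  else acc
termination_by (j + 1 - i).toNat
decreasing_by omega

-- 'while not complete': no structural bound, so the port carries a fuel counter
-- (n! + 1 ticks, one per iteration; the proof shows the loop stops within the fuel,
-- and the same counter appears in B's port)
def spLoopA (fuel : Nat) (result : List String) (current : String)
    (checker : PySem.Dict String Bool) : List String :=
  match fuel with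
  | 0 => result
  | fuel + 1 =>
    let string := String.ofList (spInner current.toList [] 0 ((current.toList.length : Int) - 1))
    if checker.contains string = false then
      spLoopA fuel (result ++ [string]) string (checker.insert string true)
    else result

def spiral_permutations (s : String) : List String :=
  spLoopA (s.toList.length.factorial + 1) [s] s ((PySem.Dict.empty).insert s true)

-- ===== PORT B =====
-- def unspiral(x): buf = ['']*n; for t in range((n+1)//2): buf[n-1-t]=x[2t]; if 2t+1<n: buf[t]=x[2t+1]
-- (placeholder buffer, every slot overwritten; pyGetD: indices are in range on length-n input)
def unspiralLoop (x : List Char) (n : Nat) : List Char :=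
  (List.range ((n + 1) / 2)).foldl
    (fun buf t =>
      let b2 := buf.set (n - 1 - t) (PySem.List.pyGetD x ((2 * t : Nat) : Int) ' ')
      if 2 * t + 1 < n then b2.set t (PySem.List.pyGetD x ((2 * t + 1 : Nat) : Int) ' ') else b2)
    (List.replicate n ' ')

def unspiral (n : Nat) (x : String) : String := String.ofList (unspiralLoop x.toList n)

-- tail = []; x = unspiral(s); while x != s: tail.append(x); x = unspiral(x)
-- (same fuel counter as port A; the proof shows the loop stops within it)
def spLoopBwd (n : Nat) (s : String) (fuel : Nat) (tail : List String) (x : String) : List String :=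
  match fuel with
  | 0 => tail
  | fuel + 1 =>
    if x ≠ s then spLoopBwd n s fuel (tail ++ [x]) (unspiral n x) else tail

-- tail.reverse(); return [s] + tail
def spiral_permutations_alt (s : String) : List String :=
  let n := s.toList.length
  [s] ++ (spLoopBwd n s (n.factorial + 1) [] (unspiral n s)).reverse

-- ===== PRECONDITION & SPEC =====
def Spec_spiral_permutations (s : String) (out : List String) : Prop := out = spiral_permutations_alt s
instance (s : String) (out : List String) : Decidable (Spec_spiral_permutations s out) := by unfold Spec_spiral_permutations; infer_instance

-- ===== CLAIM (what is proved, stated in full; the proofs are below) =====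
def Claim_equal_spiral_permutations : Prop := ∀ (s : String), Dom_spiral_permutations s → Spec_spiral_permutations s (spiral_permutations s)

-- ===== LEMMAS AND PROOFS =====

-- ghost objects for the proof: the spiral step as application of an index permutation
def spPerm (n : Nat) : List Int :=
  (List.range (n / 2)).foldl
    (fun (acc : List Int) (t : Nat) => acc ++ [(n : Int) - 1 - (t : Int), (t : Int)]) []
    ++ (if n % 2 = 1 then [((n / 2 : Nat) : Int)] else [])

def spApply (perm : List Int) (x : List Char) : List Char :=
  perm.map (fun k => PySem.List.pyGetD x k ' ')

-- ghost forward loop (the shape A's loop reduces to once the seen-dict is eliminated)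
def spLoopFwd (perm : List Int) (s : String) (fuel : Nat) (result : List String)
    (nxt : List Char) : List String :=
  match fuel with
  | 0 => result
  | fuel + 1 =>
    if String.ofList nxt ≠ s then
      spLoopFwd perm s fuel (result ++ [String.ofList nxt]) (spApply perm nxt)
    else result

-- the spiral step on strings, as a function to iterate
def stepF (n : Nat) (x : String) : String := String.ofList (spApply (spPerm n) x.toList)

-- ---- A's inner loop computes spApply (spPerm n) ----

theorem spInner_acc (cur : List Char) (m : Nat) :
    ∀ (acc : List Char) (i j : Int), (j + 1 - i).toNat = m →
      spInner cur acc i j = acc ++ spInner cur [] i j := by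
  induction m using Nat.strong_induction_on with
  | _ m ih =>
    intro acc i j hm
    conv_lhs => rw [spInner]
    conv_rhs => rw [spInner]
    by_cases h : i ≤ j
    · simp only [if_pos h]
      rw [ih ((j - 1) + 1 - (i + 1)).toNat (by omega) _ (i+1) (j-1) rfl,
          ih ((j - 1) + 1 - (i + 1)).toNat (by omega)
            (([] : List Char) ++ _) (i+1) (j-1) rfl]
      simp [List.append_assoc]
    · simp [if_neg h]

theorem spInner_closed (x : List Char) (m : Nat) :
    ∀ (i j : Int), (j - i + 1).toNat = m →
      spInner x [] i j =
        (List.range (m / 2)).flatMap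
          (fun (t : Nat) => [PySem.List.pyGetD x (j - (t : Int)) ' ',
                     PySem.List.pyGetD x (i + (t : Int)) ' ']) ++
        (if m % 2 = 1 then [PySem.List.pyGetD x (i + (j - i) / 2) ' '] else []) := by
  induction m using Nat.strong_induction_on with
  | _ m ih =>
    intro i j hm
    conv_lhs => rw [spInner]
    by_cases h : i ≤ j
    · simp only [if_pos h]
      rw [spInner_acc x ((j-1) + 1 - (i+1)).toNat _ (i+1) (j-1) rfl]
      by_cases hij : i = j
      · have hm1 : m = 1 := by omega
        subst hm1
        conv_lhs => rw [spInner]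
        have h2 : ¬ (i + 1 ≤ j - 1) := by omega
        simp only [if_pos hij, if_neg h2]
        simp [hij]
      · have hm2 : 2 ≤ m := by omega
        rw [ih (m - 2) (by omega) (i+1) (j-1) (by omega)]
        simp only [if_neg hij]
        have hr : List.range (m / 2) = 0 :: List.map Nat.succ (List.range (m / 2 - 1)) := by
          have : m / 2 = (m / 2 - 1) + 1 := by omega
          conv_lhs => rw [this]
          rw [List.range_succ_eq_map]
        rw [hr]
        simp only [List.flatMap_cons, List.flatMap_map]
        have hdiv : (m - 2) / 2 = m / 2 - 1 := by omega
        have hmod : (m - 2) % 2 = m % 2 := by omega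
        rw [hdiv, hmod]
        have hfun : (fun t : Nat =>
              [PySem.List.pyGetD x (j - 1 - (t : Int)) ' ', PySem.List.pyGetD x (i + 1 + (t : Int)) ' '])
            = (fun t : Nat => [PySem.List.pyGetD x (j - ((Nat.succ t : Nat) : Int)) ' ',
                PySem.List.pyGetD x (i + ((Nat.succ t : Nat) : Int)) ' ']) := by
          funext t
          have e1 : j - 1 - (t : Int) = j - ((Nat.succ t : Nat) : Int) := by push_cast; ring
          have e2 : i + 1 + (t : Int) = i + ((Nat.succ t : Nat) : Int) := by push_cast; ring
          rw [e1, e2]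
        rw [hfun]
        simp only [Nat.cast_zero, sub_zero, add_zero, List.nil_append, List.cons_append]
        congr 2
        by_cases hodd : m % 2 = 1
        · simp only [if_pos hodd]
          have : i + 1 + (j - 1 - (i + 1)) / 2 = i + (j - i) / 2 := by omega
          rw [this]
        · simp [if_neg hodd]
    · have hm0 : m = 0 := by omega
      subst hm0
      simp [if_neg h]

theorem spPerm_eq_flatMap (n : Nat) :
    spPerm n = (List.range (n / 2)).flatMap (fun (t : Nat) => [(n : Int) - 1 - (t : Int), (t : Int)])
      ++ (if n % 2 = 1 then [((n / 2 : Nat) : Int)] else []) := by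
  unfold spPerm
  rw [PySem.List.foldl_append_eq_flatMap]
  simp

theorem length_spPerm (n : Nat) : (spPerm n).length = n := by
  rw [spPerm_eq_flatMap]
  by_cases hodd : n % 2 = 1 <;>
  · simp [List.length_flatMap, hodd]
    omega

theorem mem_spPerm (n : Nat) (k : Int) : k ∈ spPerm n ↔ 0 ≤ k ∧ k < (n : Int) := by
  rw [spPerm_eq_flatMap]
  simp only [List.mem_append, List.mem_flatMap, List.mem_range, List.mem_cons,
    List.not_mem_nil, or_false]
  constructor
  · rintro (⟨t, ht, rfl | rfl⟩ | h)
    · constructor <;> omega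
    · constructor <;> omega
    · split at h
      · simp at h; subst h; constructor <;> omega
      · simp at h
  · rintro ⟨h0, hn⟩
    by_cases h1 : k.toNat < n / 2
    · exact Or.inl ⟨k.toNat, h1, Or.inr (by omega)⟩
    · by_cases h2 : n - 1 - k.toNat < n / 2
      · refine Or.inl ⟨n - 1 - k.toNat, h2, Or.inl (by omega)⟩
      · have hodd : n % 2 = 1 := by omega
        right
        simp [hodd]
        omega

theorem spInner_eq_spApply (x : List Char) :
    spInner x [] 0 ((x.length : Int) - 1) = spApply (spPerm x.length) x := by
  set n := x.length with hn
  rw [spInner_closed x n 0 ((n : Int) - 1) (by omega)]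
  rw [spApply, spPerm_eq_flatMap, List.map_append, List.map_flatMap]
  congr 1
  · congr 1
    funext t
    simp
  · by_cases hodd : n % 2 = 1
    · simp only [if_pos hodd, List.map_cons, List.map_nil]
      congr 2
      omega
    · simp [hodd]

theorem length_spApply (p : List Int) (x : List Char) : (spApply p x).length = p.length :=
  List.length_map ..

theorem spApply_inj {n : Nat} {x y : List Char} (hx : x.length = n) (hy : y.length = n)
    (h : spApply (spPerm n) x = spApply (spPerm n) y) : x = y := by
  apply List.ext_getElem (by omega)
  intro m hm hm'
  have hmem : (m : Int) ∈ spPerm n := (mem_spPerm n m).mpr (by constructor <;> omega)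
  have := (List.map_eq_map_iff.mp h) (m : Int) hmem
  simpa [PySem.List.pyGetD_natCast, List.getD_eq_getElem?_getD, List.getElem?_eq_getElem,
    hm, hm'] using this

-- ---- A's outer loop reduces to the ghost forward loop (seen-dict eliminated) ----

structure SpInv (s : String) (res : List String) (cur : String)
    (checker : PySem.Dict String Bool) : Prop where
  ne : res ≠ []
  head : res.head? = some s
  chain : List.IsChain (fun a b => b = String.ofList (spApply (spPerm s.length) a.toList)) res
  nodup : res.Nodup
  last : res.getLast? = some cur
  mem : ∀ t, checker.contains t = true ↔ t ∈ res
  len : ∀ t ∈ res, t.length = s.length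

theorem repeat_iff (s : String) (res : List String) (cur : String)
    (checker : PySem.Dict String Bool) (h : SpInv s res cur checker) :
    String.ofList (spApply (spPerm s.length) cur.toList) ∈ res ↔
      String.ofList (spApply (spPerm s.length) cur.toList) = s := by
  have hcur : cur ∈ res := List.mem_of_mem_getLast? (by rw [h.last]; rfl)
  constructor
  · intro hmem
    obtain ⟨j, hj, hje⟩ := List.getElem_of_mem hmem
    match j with
    | 0 =>
      rw [← hje]
      have := h.head
      rw [List.head?_eq_getElem?] at this
      rw [List.getElem?_eq_getElem hj] at this
      exact (Option.some_injective _ this)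
    | j + 1 =>
      exfalso
      have hchain := (List.isChain_iff_getElem.mp h.chain) j (by omega)
      have hfe : String.ofList (spApply (spPerm s.length) (res[j]'(by omega)).toList)
          = String.ofList (spApply (spPerm s.length) cur.toList) := by
        rw [← hchain, hje]
      have happ : spApply (spPerm s.length) (res[j]'(by omega)).toList
          = spApply (spPerm s.length) cur.toList := by
        have := congrArg String.toList hfe
        simpa using this
      have heq : (res[j]'(by omega)) = cur := by
        have hl1 : (res[j]'(by omega)).toList.length = s.length := by
          rw [String.length_toList]; exact h.len _ (List.getElem_mem _)
        have hl2 : cur.toList.length = s.length := by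
          rw [String.length_toList]; exact h.len _ hcur
        have := spApply_inj hl1 hl2 happ
        exact String.toList_inj.mp this
      have hlast : res.getLast h.ne = cur := by
        have := h.last
        rw [List.getLast?_eq_some_getLast h.ne] at this
        exact Option.some_injective _ this
      rw [List.getLast_eq_getElem] at hlast
      have hij : j = res.length - 1 := by
        have := h.nodup.getElem_inj_iff.mp (heq.trans hlast.symm)
        omega
      omega
  · intro he
    rw [he]
    exact List.mem_of_mem_head? (by rw [h.head]; rfl)

theorem loop_eq (s : String) (fuel : Nat) :
    ∀ (res : List String) (cur : String) (checker : PySem.Dict String Bool),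
      SpInv s res cur checker →
      spLoopA fuel res cur checker =
        spLoopFwd (spPerm s.length) s fuel res (spApply (spPerm s.length) cur.toList) := by
  induction fuel with
  | zero => intro res cur checker _; rfl
  | succ fuel ih =>
    intro res cur checker h
    have hcur : cur ∈ res := List.mem_of_mem_getLast? (by rw [h.last]; rfl)
    have hclen : cur.length = s.length := h.len _ hcur
    have hstr : String.ofList (spInner cur.toList [] 0 ((cur.length : Int) - 1))
        = String.ofList (spApply (spPerm s.length) cur.toList) := by
      have := spInner_eq_spApply cur.toList
      rw [String.length_toList] at this
      rw [this, hclen]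
    rw [spLoopA, spLoopFwd]
    simp only [String.length_toList, hstr]
    by_cases hcase : String.ofList (spApply (spPerm s.length) cur.toList) = s
    · have hmem : String.ofList (spApply (spPerm s.length) cur.toList) ∈ res :=
        (repeat_iff s res cur checker h).mpr hcase
      have : checker.contains (String.ofList (spApply (spPerm s.length) cur.toList)) = true :=
        (h.mem _).mpr hmem
      rw [hcase] at this ⊢
      simp [this]
    · have hmem : String.ofList (spApply (spPerm s.length) cur.toList) ∉ res :=
        fun hm => hcase ((repeat_iff s res cur checker h).mp hm)
      have hcont : checker.contains (String.ofList (spApply (spPerm s.length) cur.toList)) = false := by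
        rw [← Bool.not_eq_true]
        intro hc
        exact hmem ((h.mem _).mp hc)
      simp only [hcont, ne_eq, hcase, not_false_iff, if_pos]
      set w := String.ofList (spApply (spPerm s.length) cur.toList) with hw
      have hnext : SpInv s (res ++ [w]) w (checker.insert w true) := by
        refine ⟨by simp, ?_, ?_, ?_, by simp, ?_, ?_⟩
        · rcases res with _ | ⟨a, l⟩
          · exact absurd rfl h.ne
          · simpa using h.head
        · rw [List.isChain_append]
          refine ⟨h.chain, List.isChain_singleton _, ?_⟩
          intro a ha b hb
          rw [h.last] at ha
          simp at ha hb
          rw [← ha, ← hb]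
        · rw [List.nodup_append]
          refine ⟨h.nodup, List.nodup_singleton _, ?_⟩
          intro x hx y hy
          simp at hy
          subst hy
          exact fun hxx => hmem (hxx ▸ hx)
        · intro t
          rw [PySem.Dict.contains_insert]
          by_cases ht : t = w
          · simp [ht]
          · simp only [List.mem_append, List.mem_singleton, ht, or_false]
            have : (t == w) = false := by simp [ht]
            rw [this]
            simp [h.mem t]
        · intro t htm
          rcases List.mem_append.mp htm with htm | htm
          · exact h.len t htm
          · simp at htm
            rw [htm, hw]
            rw [String.length_ofList, length_spApply, length_spPerm]
      have := ih (res ++ [w]) w (checker.insert w true) hnext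
      rw [this]
      congr 1
      simp [hw]

theorem A_eq_fwd (s : String) :
    spiral_permutations s =
      spLoopFwd (spPerm s.length) s (s.length.factorial + 1) [s]
        (spApply (spPerm s.length) s.toList) := by
  unfold spiral_permutations
  simp only [String.length_toList]
  have inv : SpInv s [s] s ((PySem.Dict.empty).insert s true) := by
    refine ⟨by simp, rfl, List.isChain_singleton _, List.nodup_singleton _, rfl, ?_, by simp⟩
    intro t
    rw [PySem.Dict.contains_insert]
    by_cases ht : t = s
    · simp [ht]
    · have htb : (t == s) = false := by simp [ht]
      rw [htb]
      simp [PySem.Dict.contains_empty, ht]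
  rw [loop_eq s (s.length.factorial + 1) [s] s _ inv]

-- ---- closed (indexed) form of the permutation, nodup, multiset invariance ----

theorem pair_flatMap (m : Nat) (f g : Nat → Int) :
    (List.range m).flatMap (fun t => [f t, g t]) =
      (List.range (2 * m)).map (fun q => if q % 2 = 0 then f (q / 2) else g (q / 2)) := by
  induction m with
  | zero => simp
  | succ m ih =>
    rw [List.range_succ, List.flatMap_append, ih]
    have h2 : 2 * (m + 1) = (2 * m + 1) + 1 := by ring
    rw [h2, List.range_succ, List.range_succ, List.map_append, List.map_append]
    have e1 : (2 * m) % 2 = 0 := by omega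
    have e2 : (2 * m) / 2 = m := by omega
    have e3 : (2 * m + 1) % 2 = 1 := by omega
    have e4 : (2 * m + 1) / 2 = m := by omega
    simp [e1, e2, e3, e4]

theorem spPerm_eq_map (n : Nat) :
    spPerm n = (List.range n).map
      (fun q => if q % 2 = 0 then ((n : Int) - 1 - ((q / 2 : Nat) : Int)) else ((q / 2 : Nat) : Int)) := by
  rw [spPerm_eq_flatMap, pair_flatMap]
  by_cases hodd : n % 2 = 1
  · have h2 : 2 * (n / 2) + 1 = n := by omega
    have hr : List.range n = List.range (2 * (n / 2)) ++ [2 * (n / 2)] := by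
      rw [← List.range_succ]
      congr 1
      omega
    rw [hr, List.map_append, if_pos hodd]
    congr 1
    have e1 : (2 * (n / 2)) % 2 = 0 := by omega
    have e2 : (2 * (n / 2)) / 2 = n / 2 := by omega
    simp only [List.map_cons, List.map_nil, e1, e2]
    congr 1
    omega
  · have hr : List.range n = List.range (2 * (n / 2)) := by
      congr 1
      omega
    rw [if_neg hodd, List.append_nil, hr]

theorem getElem_spPerm (n q : Nat) (h : q < (spPerm n).length) :
    (spPerm n)[q] =
      if q % 2 = 0 then ((n : Int) - 1 - ((q / 2 : Nat) : Int)) else ((q / 2 : Nat) : Int) := by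
  have hq : q < n := by rw [length_spPerm] at h; exact h
  rw [List.getElem_of_eq (spPerm_eq_map n)]
  simp [List.getElem_map]

theorem nodup_spPerm (n : Nat) : (spPerm n).Nodup := by
  rw [spPerm_eq_map]
  refine List.Nodup.map_on ?_ (List.nodup_range)
  intro a ha b hb hab
  simp only [List.mem_range] at ha hb
  split_ifs at hab <;> omega

theorem spPerm_perm_range (n : Nat) :
    (spPerm n).Perm ((List.range n).map (fun q : Nat => (q : Int))) := by
  have h2 : ((List.range n).map (fun q : Nat => (q : Int))).Nodup :=
    List.Nodup.map (f := fun q : Nat => (q : Int)) (fun a b h => by simpa using h)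
      List.nodup_range
  rw [List.perm_ext_iff_of_nodup (nodup_spPerm n) h2]
  intro a
  rw [mem_spPerm]
  constructor
  · rintro ⟨h0, hn⟩
    simp only [List.mem_map, List.mem_range]
    exact ⟨a.toNat, by omega, by omega⟩
  · intro hmem
    simp only [List.mem_map, List.mem_range] at hmem
    obtain ⟨q, hq, rfl⟩ := hmem
    omega

theorem pyGetD_lt (x : List Char) (m : Nat) (h : m < x.length) :
    PySem.List.pyGetD x ((m : Nat) : Int) ' ' = x[m] := by
  simp [PySem.List.pyGetD_natCast, List.getD_eq_getElem?_getD, List.getElem?_eq_getElem h]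

theorem spApply_perm_self (x : List Char) : (spApply (spPerm x.length) x).Perm x := by
  have h3 : ((List.range x.length).map (fun q : Nat => (q : Int))).map
      (fun k => PySem.List.pyGetD x k ' ') = x := by
    rw [List.map_map]
    apply List.ext_getElem
    · simp
    · intro i h1 h2
      simp only [List.getElem_map, List.getElem_range, Function.comp]
      exact pyGetD_lt x i (by simpa using h2)
  have hp := (spPerm_perm_range x.length).map (fun k => PySem.List.pyGetD x k ' ')
  rw [h3] at hp
  exact hp

-- ---- the un-spiral buffer fold inverts the spiral step ----

theorem uFold_length (y : List Char) (n : Nat) (m : Nat) :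
    (((List.range m).foldl
      (fun buf t =>
        let b2 := buf.set (n - 1 - t) (PySem.List.pyGetD y ((2 * t : Nat) : Int) ' ')
        if 2 * t + 1 < n then b2.set t (PySem.List.pyGetD y ((2 * t + 1 : Nat) : Int) ' ') else b2)
      (List.replicate n ' '))).length = n := by
  have aux : ∀ (l : List Nat) (B : List Char), B.length = n →
      ((l.foldl
        (fun buf t =>
          let b2 := buf.set (n - 1 - t) (PySem.List.pyGetD y ((2 * t : Nat) : Int) ' ')
          if 2 * t + 1 < n then b2.set t (PySem.List.pyGetD y ((2 * t + 1 : Nat) : Int) ' ') else b2)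
        B)).length = n := by
    intro l
    induction l with
    | nil => intro B h; exact h
    | cons a l ih =>
      intro B h
      rw [List.foldl_cons]
      apply ih
      dsimp only
      split <;> simp [h]
  exact aux (List.range m) (List.replicate n ' ') (by simp)

theorem uFold_getElem (y : List Char) (n : Nat) (m : Nat) (hm : m ≤ (n + 1) / 2)
    (p : Nat) (hp : p < n)
    (hlt : p < (((List.range m).foldl
      (fun buf t =>
        let b2 := buf.set (n - 1 - t) (PySem.List.pyGetD y ((2 * t : Nat) : Int) ' ')
        if 2 * t + 1 < n then b2.set t (PySem.List.pyGetD y ((2 * t + 1 : Nat) : Int) ' ') else b2)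
      (List.replicate n ' '))).length) :
    (((List.range m).foldl
      (fun buf t =>
        let b2 := buf.set (n - 1 - t) (PySem.List.pyGetD y ((2 * t : Nat) : Int) ' ')
        if 2 * t + 1 < n then b2.set t (PySem.List.pyGetD y ((2 * t + 1 : Nat) : Int) ' ') else b2)
      (List.replicate n ' ')))[p] =
      if n - 1 - p < m then PySem.List.pyGetD y ((2 * (n - 1 - p) : Nat) : Int) ' '
      else if p < m ∧ 2 * p + 1 < n then PySem.List.pyGetD y ((2 * p + 1 : Nat) : Int) ' '
      else ' ' := by
  induction m with
  | zero =>
    simp only [List.range_zero, List.foldl_nil, List.getElem_replicate]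
    rw [if_neg (by omega), if_neg (by omega)]
  | succ m ih =>
    rw [List.getElem_of_eq (by rw [List.range_succ, List.foldl_append, List.foldl_cons, List.foldl_nil])]
    dsimp only
    by_cases h2 : 2 * m + 1 < n
    · rw [List.getElem_of_eq (if_pos h2)]
      simp only [List.getElem_set]
      by_cases hpm : m = p
      · subst hpm
        rw [if_pos rfl, if_neg (by omega), if_pos ⟨by omega, h2⟩]
      · rw [if_neg hpm]
        by_cases hpn : n - 1 - m = p
        · rw [if_pos hpn, if_pos (by omega)]
          have e : 2 * (n - 1 - p) = 2 * m := by omega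
          rw [e]
        · rw [if_neg hpn, ih (by omega) (by rw [uFold_length]; exact hp)]
          split_ifs <;> first | rfl | omega
    · rw [List.getElem_of_eq (if_neg h2)]
      have hn1 : n = 2 * m + 1 := by omega
      simp only [List.getElem_set]
      by_cases hpn : n - 1 - m = p
      · rw [if_pos hpn, if_pos (by omega)]
        have e : 2 * (n - 1 - p) = 2 * m := by omega
        rw [e]
      · rw [if_neg hpn, ih (by omega) (by rw [uFold_length]; exact hp)]
        split_ifs <;> first | rfl | omega

theorem unspiral_spApply (n : Nat) (x : List Char) (hx : x.length = n) :
    unspiralLoop (spApply (spPerm n) x) n = x := by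
  subst hx
  have hy : (spApply (spPerm x.length) x).length = x.length := by
    rw [length_spApply, length_spPerm]
  apply List.ext_getElem
  · unfold unspiralLoop
    rw [uFold_length]
  · intro p h1 h2
    unfold unspiralLoop
    rw [uFold_getElem (spApply (spPerm x.length) x) x.length ((x.length + 1) / 2) (le_refl _) p h2]
    have hget : ∀ (q : Nat) (hq : q < x.length),
        PySem.List.pyGetD (spApply (spPerm x.length) x) ((q : Nat) : Int) ' ' =
          PySem.List.pyGetD x ((spPerm x.length)[q]'(by rw [length_spPerm]; exact hq)) ' ' := by
      intro q hq
      rw [pyGetD_lt _ q (by rw [hy]; exact hq)]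
      unfold spApply
      rw [List.getElem_map]
    by_cases hp2 : x.length - 1 - p < (x.length + 1) / 2
    · rw [if_pos hp2]
      have hq : 2 * (x.length - 1 - p) < x.length := by omega
      rw [hget _ hq, getElem_spPerm _ _ (by rw [length_spPerm]; exact hq)]
      rw [if_pos (by omega)]
      have e : ((x.length : Int) - 1 - ((2 * (x.length - 1 - p) / 2 : Nat) : Int)) = ((p : Nat) : Int) := by
        have : 2 * (x.length - 1 - p) / 2 = x.length - 1 - p := by omega
        rw [this]
        omega
      rw [e, pyGetD_lt x p h2]
    · rw [if_neg hp2, if_pos ⟨by omega, by omega⟩]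
      have hq : 2 * p + 1 < x.length := by omega
      rw [hget _ hq, getElem_spPerm _ _ (by rw [length_spPerm]; exact hq)]
      rw [if_neg (by omega)]
      have e : (((2 * p + 1) / 2 : Nat) : Int) = ((p : Nat) : Int) := by
        have : (2 * p + 1) / 2 = p := by omega
        rw [this]
      rw [e, pyGetD_lt x p h2]

-- ---- string-level facts about the iterated step ----

theorem toList_stepF (n : Nat) (x : String) :
    (stepF n x).toList = spApply (spPerm n) x.toList := by
  unfold stepF
  exact String.toList_ofList

theorem length_stepF (n : Nat) (x : String) : (stepF n x).toList.length = n := by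
  rw [toList_stepF, length_spApply, length_spPerm]

theorem iter_length (n : Nat) (s : String) (hs : s.toList.length = n) (m : Nat) :
    ((stepF n)^[m] s).toList.length = n := by
  induction m with
  | zero => exact hs
  | succ m ih =>
    rw [Function.iterate_succ_apply']
    exact length_stepF n _

theorem unspiral_stepF (n : Nat) (x : String) (hx : x.toList.length = n) :
    unspiral n (stepF n x) = x := by
  unfold unspiral
  rw [toList_stepF, unspiral_spApply n x.toList hx]
  exact String.ofList_toList

theorem stepF_inj (n : Nat) {x y : String} (hx : x.toList.length = n) (hy : y.toList.length = n)
    (h : stepF n x = stepF n y) : x = y := by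
  have h2 : spApply (spPerm n) x.toList = spApply (spPerm n) y.toList := by
    have := congrArg String.toList h
    rwa [toList_stepF, toList_stepF] at this
  exact String.toList_inj.mp (spApply_inj hx hy h2)

theorem iter_inj (n : Nat) (m : Nat) :
    ∀ {x y : String}, x.toList.length = n → y.toList.length = n →
      (stepF n)^[m] x = (stepF n)^[m] y → x = y := by
  induction m with
  | zero => intro x y _ _ h; simpa using h
  | succ m ih =>
    intro x y hx hy h
    rw [Function.iterate_succ_apply, Function.iterate_succ_apply] at h
    exact stepF_inj n hx hy (ih (length_stepF n x) (length_stepF n y) h)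

theorem iter_perm (n : Nat) (s : String) (hs : s.toList.length = n) (m : Nat) :
    (((stepF n)^[m] s).toList).Perm s.toList := by
  induction m with
  | zero => exact List.Perm.refl _
  | succ m ih =>
    rw [Function.iterate_succ_apply', toList_stepF]
    have h1 : ((stepF n)^[m] s).toList.length = n := iter_length n s hs m
    have h2 := spApply_perm_self ((stepF n)^[m] s).toList
    rw [h1] at h2
    exact h2.trans ih

theorem exists_period (n : Nat) (s : String) (hs : s.toList.length = n) :
    ∃ m, 0 < m ∧ m ≤ n.factorial ∧ (stepF n)^[m] s = s := by
  by_contra hno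
  push Not at hno
  have key : ∀ i j, i < j → j < n.factorial + 1 → (stepF n)^[i] s ≠ (stepF n)^[j] s := by
    intro i j hij hj he
    have h1 : (stepF n)^[i] ((stepF n)^[j - i] s) = (stepF n)^[i] s := by
      rw [← Function.iterate_add_apply]
      have e : i + (j - i) = j := by omega
      rw [e, ← he]
    have h2 := iter_inj n i (iter_length n s hs (j - i)) hs h1
    exact hno (j - i) (by omega) (by omega) h2
  have hnd : ((List.range (n.factorial + 1)).map (fun m => ((stepF n)^[m] s).toList)).Nodup := by
    refine List.Nodup.map_on ?_ (List.nodup_range)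
    intro a ha b hb hab
    simp only [List.mem_range] at ha hb
    have hST : (stepF n)^[a] s = (stepF n)^[b] s := String.toList_inj.mp hab
    rcases Nat.lt_trichotomy a b with h | h | h
    · exact absurd hST (key a b h hb)
    · exact h
    · exact absurd hST.symm (key b a h ha)
  have hsub : (List.range (n.factorial + 1)).map (fun m => ((stepF n)^[m] s).toList) ⊆
      s.toList.permutations := by
    intro z hz
    simp only [List.mem_map, List.mem_range] at hz
    obtain ⟨m, _, rfl⟩ := hz
    rw [List.mem_permutations]
    exact iter_perm n s hs m
  have hlen := (hnd.subperm hsub).length_le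
  rw [List.length_map, List.length_range, List.length_permutations, hs] at hlen
  omega

-- ---- loop characterizations via the orbit ----

theorem fwd_char (n : Nat) (s : String) (_hs : s.toList.length = n) (k : Nat)
    (hk : (stepF n)^[k] s = s) (hmin : ∀ m, 0 < m → m < k → (stepF n)^[m] s ≠ s) :
    ∀ fuel m res, 1 ≤ m → m ≤ k → k - m < fuel →
      spLoopFwd (spPerm n) s fuel res (((stepF n)^[m] s).toList) =
        res ++ (List.range' m (k - m)).map (fun i => (stepF n)^[i] s) := by
  intro fuel
  induction fuel with
  | zero => intro m res _ _ h; omega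
  | succ fuel ih =>
    intro m res h1 h2 h3
    rw [spLoopFwd]
    rw [String.ofList_toList]
    by_cases hm : m = k
    · subst hm
      rw [if_neg (by simp [hk]), Nat.sub_self]
      simp
    · have hne : (stepF n)^[m] s ≠ s := hmin m (by omega) (by omega)
      rw [if_pos hne]
      have hstep : spApply (spPerm n) (((stepF n)^[m] s).toList) = ((stepF n)^[m + 1] s).toList := by
        rw [Function.iterate_succ_apply', toList_stepF]
      rw [hstep, ih (m + 1) (res ++ [(stepF n)^[m] s]) (by omega) (by omega) (by omega)]
      rw [List.append_assoc]
      congr 1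
      have e : k - m = (k - (m + 1)) + 1 := by omega
      rw [e, List.range'_succ]
      simp

theorem bwd_char (n : Nat) (s : String) (hs : s.toList.length = n) (k : Nat) (hk0 : 0 < k)
    (hk : (stepF n)^[k] s = s) (hmin : ∀ m, 0 < m → m < k → (stepF n)^[m] s ≠ s) :
    ∀ fuel j tail, 1 ≤ j → j ≤ k → k - j < fuel →
      spLoopBwd n s fuel tail ((stepF n)^[k - j] s) =
        tail ++ ((List.range' 1 (k - j)).reverse).map (fun i => (stepF n)^[i] s) := by
  intro fuel
  induction fuel with
  | zero => intro j tail _ _ h; omega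
  | succ fuel ih =>
    intro j tail h1 h2 h3
    rw [spLoopBwd]
    by_cases hj : j = k
    · subst hj
      rw [Nat.sub_self]
      simp
    · have hne : (stepF n)^[k - j] s ≠ s := hmin (k - j) (by omega) (by omega)
      rw [if_pos hne]
      have hun : unspiral n ((stepF n)^[k - j] s) = (stepF n)^[k - j - 1] s := by
        have e : (stepF n)^[k - j] s = stepF n ((stepF n)^[k - j - 1] s) := by
          conv_lhs => rw [show k - j = (k - j - 1) + 1 from by omega]
          rw [Function.iterate_succ_apply']
        rw [e, unspiral_stepF n _ (iter_length n s hs _)]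
      rw [hun, show k - j - 1 = k - (j + 1) from by omega,
        ih (j + 1) (tail ++ [(stepF n)^[k - j] s]) (by omega) (by omega) (by omega)]
      rw [List.append_assoc]
      congr 1
      rw [show k - j = (k - (j + 1)) + 1 from by omega, List.range'_1_concat]
      simp [Nat.add_comm]

-- ===== VERDICT (by name: the statement is the Claim_ definition above) =====
theorem spiral_permutations_spec : Claim_equal_spiral_permutations := by
  unfold Claim_equal_spiral_permutations
  intro s _
  unfold Spec_spiral_permutations
  set n := s.length with hndef
  have hs : s.toList.length = n := String.length_toList
  obtain ⟨m0, hm0, hm0le, hm0eq⟩ := exists_period n s hs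
  have hex : ∃ m, 0 < m ∧ (stepF n)^[m] s = s := ⟨m0, hm0, hm0eq⟩
  obtain ⟨hk0, hkeq⟩ := Nat.find_spec hex
  set k := Nat.find hex with hkdef
  have hkle : k ≤ n.factorial := le_trans (Nat.find_min' hex ⟨hm0, hm0eq⟩) hm0le
  have hmin : ∀ m, 0 < m → m < k → (stepF n)^[m] s ≠ s := fun m hm1 hm2 he =>
    Nat.find_min hex hm2 ⟨hm1, he⟩
  have hA : spiral_permutations s =
      [s] ++ (List.range' 1 (k - 1)).map (fun i => (stepF n)^[i] s) := by
    rw [A_eq_fwd]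
    have h1 : spApply (spPerm s.length) s.toList = ((stepF n)^[1] s).toList := by
      rw [Function.iterate_one, toList_stepF, hndef]
    rw [h1, ← hndef]
    exact fwd_char n s hs k hkeq hmin (n.factorial + 1) 1 [s] le_rfl hk0 (by omega)
  have hB : spiral_permutations_alt s =
      [s] ++ (List.range' 1 (k - 1)).map (fun i => (stepF n)^[i] s) := by
    unfold spiral_permutations_alt
    simp only [hs]
    have h2 : unspiral n s = (stepF n)^[k - 1] s := by
      have h3 : s = stepF n ((stepF n)^[k - 1] s) := by
        conv_lhs => rw [← hkeq, show k = (k - 1) + 1 from by omega]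
        rw [Function.iterate_succ_apply']
      conv_lhs => rw [h3]
      rw [unspiral_stepF n _ (iter_length n s hs _)]
    rw [h2]
    have h4 := bwd_char n s hs k hk0 hkeq hmin (n.factorial + 1) 1 [] le_rfl hk0 (by omega)
    rw [h4, List.nil_append, List.map_reverse, List.reverse_reverse]
  rw [hA, hB]
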